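-- pv_equiv track=rewrite | github.com/dementedhedgehog/malleus_deum | src/draw.py | calc_spline_offsets
-- ===== SOURCE A (Python) =====
-- def calc_spline_offsets(offset, spline):
--     last_point = offset
--     offset_spline_points = []
--     for x, y in spline:
--         new_point = (x + last_point[0], y + last_point[1])
--         offset_spline_points.append(new_point)
--         last_point = new_point
--     return offset_spline_points
-- ===== SOURCE B (Python) =====
-- def calc_spline_offsets(offset, spline):
--     pts = [(x, y) for x, y in spline]
--     def scan(start, vals):
--         out = []
--         for v in vals:
--             start += v
--             out.append(start)
--         return out
--     xs = scan(offset[0], [p[0] for p in pts])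
--     ys = scan(offset[1], [p[1] for p in pts])
--     return list(zip(xs, ys))
-- ===== Notes on version B (the rewrite author's own statement) =====
-- stated objective: alternative
-- what changed: Replaces A's single interleaved loop carrying a running last_point pair with two independent coordinate-wise prefix-sum scans over the x's and the y's, zipped back into pairs.
import Mathlib
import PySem

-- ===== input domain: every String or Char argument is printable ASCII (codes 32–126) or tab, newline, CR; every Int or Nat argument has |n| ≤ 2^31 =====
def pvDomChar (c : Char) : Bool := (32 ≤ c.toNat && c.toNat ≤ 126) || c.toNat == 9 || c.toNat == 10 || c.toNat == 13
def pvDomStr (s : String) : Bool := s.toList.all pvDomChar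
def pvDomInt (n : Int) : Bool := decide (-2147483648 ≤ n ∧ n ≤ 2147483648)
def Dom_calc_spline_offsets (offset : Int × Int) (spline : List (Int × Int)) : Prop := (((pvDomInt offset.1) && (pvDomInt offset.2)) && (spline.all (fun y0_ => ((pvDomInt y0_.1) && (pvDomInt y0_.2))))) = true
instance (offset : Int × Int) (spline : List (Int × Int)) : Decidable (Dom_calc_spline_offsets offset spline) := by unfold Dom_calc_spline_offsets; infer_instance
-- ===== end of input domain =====

-- B replaces A's single interleaved loop over pairs with two independent coordinate-wise
-- prefix-sum scans zipped back together (alternative decomposition, same cost).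

-- ===== PORT A =====
-- A: one loop carrying (last_point, accumulated output)
def calc_spline_offsets (offset : Int × Int) (spline : List (Int × Int)) : List (Int × Int) :=
  (spline.foldl
    (fun (st : (Int × Int) × List (Int × Int)) p =>
      let new_point : Int × Int := (p.1 + st.1.1, p.2 + st.1.2)
      (new_point, st.2 ++ [new_point]))
    (offset, [])).2

-- ===== PORT B =====
-- B's helper scan: running prefix sums of one coordinate list
def pvScan (start : Int) (vals : List Int) : List Int :=
  (vals.foldl (fun (st : Int × List Int) v => (st.1 + v, st.2 ++ [st.1 + v])) (start, [])).2

def calc_spline_offsets_alt (offset : Int × Int) (spline : List (Int × Int)) : List (Int × Int) :=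
  let pts := spline.map (fun p => (p.1, p.2))
  List.zip (pvScan offset.1 (pts.map Prod.fst)) (pvScan offset.2 (pts.map Prod.snd))

-- ===== PRECONDITION & SPEC =====
def Spec_calc_spline_offsets (offset : Int × Int) (spline : List (Int × Int)) (out : List (Int × Int)) : Prop := out = calc_spline_offsets_alt offset spline
instance (offset : Int × Int) (spline : List (Int × Int)) (out : List (Int × Int)) : Decidable (Spec_calc_spline_offsets offset spline out) := by unfold Spec_calc_spline_offsets; infer_instance

-- ===== CLAIM (what is proved, stated in full; the proofs are below) =====
def Claim_equal_calc_spline_offsets : Prop := ∀ (offset : Int × Int) (spline : List (Int × Int)), Dom_calc_spline_offsets offset spline → Spec_calc_spline_offsets offset spline (calc_spline_offsets offset spline)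

-- ===== LEMMAS AND PROOFS =====

-- reference recursion both ports are reduced to
def pvGo (o : Int × Int) : List (Int × Int) → List (Int × Int)
  | [] => []
  | (x, y) :: t => (x + o.1, y + o.2) :: pvGo (x + o.1, y + o.2) t

def pvScanRec (a : Int) : List Int → List Int
  | [] => []
  | v :: t => (a + v) :: pvScanRec (a + v) t

theorem calcA_fold (spline : List (Int × Int)) :
    ∀ (lp : Int × Int) (acc : List (Int × Int)),
      (spline.foldl
        (fun (st : (Int × Int) × List (Int × Int)) p =>
          let new_point : Int × Int := (p.1 + st.1.1, p.2 + st.1.2)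
          (new_point, st.2 ++ [new_point]))
        (lp, acc)).2 = acc ++ pvGo lp spline := by
  induction spline with
  | nil => intro lp acc; simp [pvGo]
  | cons p t ih =>
      intro lp acc
      simp only [List.foldl, pvGo, ih]
      simp

theorem pvScan_fold (vals : List Int) :
    ∀ (a : Int) (acc : List Int),
      (vals.foldl (fun (st : Int × List Int) v => (st.1 + v, st.2 ++ [st.1 + v])) (a, acc)).2
        = acc ++ pvScanRec a vals := by
  induction vals with
  | nil => intro a acc; simp [pvScanRec]
  | cons v t ih =>
      intro a acc
      simp only [List.foldl, pvScanRec, ih]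
      simp

theorem zip_scan_eq_go (spline : List (Int × Int)) :
    ∀ (o : Int × Int),
      List.zip (pvScanRec o.1 (spline.map Prod.fst)) (pvScanRec o.2 (spline.map Prod.snd))
        = pvGo o spline := by
  induction spline with
  | nil => intro o; simp [pvScanRec, pvGo]
  | cons p t ih =>
      intro o
      simp only [List.map, pvScanRec, pvGo, List.zip_cons_cons]
      rw [show o.1 + p.1 = p.1 + o.1 from Int.add_comm _ _,
          show o.2 + p.2 = p.2 + o.2 from Int.add_comm _ _]
      exact congrArg _ (ih (p.1 + o.1, p.2 + o.2))

-- ===== VERDICT (by name: the statement is the Claim_ definition above) =====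
theorem calc_spline_offsets_spec : Claim_equal_calc_spline_offsets := by
  intro offset spline _
  unfold Spec_calc_spline_offsets calc_spline_offsets calc_spline_offsets_alt pvScan
  simp only [calcA_fold, pvScan_fold, List.nil_append]
  have h1 : (spline.map fun p => ((p.1 : Int), p.2)).map Prod.fst = spline.map Prod.fst := by simp
  have h2 : (spline.map fun p => ((p.1 : Int), p.2)).map Prod.snd = spline.map Prod.snd := by simp
  rw [h1, h2, zip_scan_eq_go]
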